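-- pv_equiv track=rewrite | github.com/yairfine/nand-to-tetris | 11/src/JackTokenizer.py | clean_comments
-- ===== SOURCE A (Python) =====
-- def clean_comments(lines):
--     result = []
--     for line in lines:
--         is_string = False
--         line_length = len(line)
--         prev_char = None
--         for pos, char in enumerate(line):
--             if char == '"':
--                 is_string = not(is_string)
--             if prev_char == "/" and char == "/" and is_string is False:
--                 line_length = pos - 1
--                 break
--             prev_char = char
--         result.append(line[:line_length])
--     return " ".join(result)
-- ===== SOURCE B (Python) =====
-- def clean_comments(lines):
--     cleaned = []
--     for line in lines:
--         segments = line.split('"')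
--         offset = 0
--         cut = None
--         for i, seg in enumerate(segments):
--             if i % 2 == 0:
--                 j = seg.find('//')
--                 if j != -1:
--                     cut = offset + j
--                     break
--             offset += len(seg) + 1
--         cleaned.append(line if cut is None else line[:cut])
--     return " ".join(cleaned)
-- ===== Notes on version B (the rewrite author's own statement) =====
-- stated objective: alternative
-- what changed: B replaces A's per-character scan (quote-parity flag + previous-char tracking) with a split-on-quote decomposition: segments at even indices are outside string literals, so the cut point is the first '//' found by substring search in an even segment, located via a running offset.
import Mathlib
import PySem

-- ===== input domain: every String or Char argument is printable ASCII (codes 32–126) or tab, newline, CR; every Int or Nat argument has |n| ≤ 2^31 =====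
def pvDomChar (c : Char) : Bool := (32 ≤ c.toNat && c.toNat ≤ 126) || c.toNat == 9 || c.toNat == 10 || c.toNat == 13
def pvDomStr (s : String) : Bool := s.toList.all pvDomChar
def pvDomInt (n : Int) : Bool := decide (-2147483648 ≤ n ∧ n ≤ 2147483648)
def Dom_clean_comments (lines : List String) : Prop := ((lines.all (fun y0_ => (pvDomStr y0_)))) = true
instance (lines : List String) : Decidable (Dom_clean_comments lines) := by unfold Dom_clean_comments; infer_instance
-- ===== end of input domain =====

-- B replaces A's per-character scan (quote-parity flag + previous-char tracking) with a
-- split-on-'"' decomposition: even-index segments lie outside string literals, so the cut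
-- point is the first '//' found by substring search in an even segment (objective: alternative).


-- ===== PORT A =====
-- the inner 'for pos, char in enumerate(line)' loop with its break:
-- state (is_string, prev_char, pos) and result line_length (default n = len(line))
def scanA : List Char → Bool → Option Char → Nat → Nat → Nat
  | [], _, _, _, n => n
  | c :: rest, isStr, prev, pos, n =>
    let isStr' := if c = '"' then !isStr else isStr
    if prev = some '/' ∧ c = '/' ∧ isStr' = false then pos - 1
    else scanA rest isStr' (some c) (pos + 1) n

-- one iteration of the outer loop body: line[:line_length]
def cleanLineA (line : String) : String :=
  let cs := line.toList
  String.ofList (PySem.List.slice cs none (some ((scanA cs false none 0 cs.length : Nat) : Int)))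

def clean_comments (lines : List String) : String :=
  PySem.Str.join " " (lines.map cleanLineA)

-- ===== PORT B =====
-- the 'for i, seg in enumerate(segments)' loop of Source B, with running offset
def findCutB : List (List Char) → Nat → Int → Option Int
  | [], _, _ => none
  | seg :: segs, i, off =>
    if i % 2 = 0 then
      let j := PySem.Chars.find seg ['/', '/']
      if j = -1 then findCutB segs (i + 1) (off + seg.length + 1)
      else some (off + j)
    else findCutB segs (i + 1) (off + seg.length + 1)

-- line.split('"') with a nonempty separator never raises: Chars.splitOn is exact here
def cleanLineB (line : String) : String :=
  let cs := line.toList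
  match findCutB (PySem.Chars.splitOn cs ['"']) 0 0 with
  | none => line
  | some cut => String.ofList (PySem.List.slice cs none (some cut))

def clean_comments_alt (lines : List String) : String :=
  PySem.Str.join " " (lines.map cleanLineB)

-- ===== PRECONDITION & SPEC =====
def Spec_clean_comments (lines : List String) (out : String) : Prop := out = clean_comments_alt lines
instance (lines : List String) (out : String) : Decidable (Spec_clean_comments lines out) := by unfold Spec_clean_comments; infer_instance

-- ===== CLAIM (what is proved, stated in full; the proofs are below) =====
def Claim_equal_clean_comments : Prop := ∀ (lines : List String), Dom_clean_comments lines → Spec_clean_comments lines (clean_comments lines)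

-- ===== LEMMAS AND PROOFS =====

-- the common reference point: index of the first '/' of the first "//" outside string literals
def K : List Char → Bool → Option Nat
  | [], _ => none
  | c :: rest, s =>
    if c = '/' ∧ rest.head? = some '/' ∧ s = false then some 0
    else (K rest (if c = '"' then !s else s)).map (· + 1)

-- first occurrence of "//" inside one quote-free segment
def find2 : List Char → Option Nat
  | [] => none
  | c :: rest =>
    if c = '/' ∧ rest.head? = some '/' then some 0
    else (find2 rest).map (· + 1)

-- split on '"' as plain structural recursion
def qsplit : List Char → List (List Char)
  | [] => [[]]
  | c :: rest => if c = '"' then [] :: qsplit rest else (qsplit rest).modifyHead (c :: ·)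

-- A's line_length as a function of K
def KN (cs : List Char) (s : Bool) (pos n : Nat) : Nat :=
  match K cs s with | some j => pos + j | none => n

theorem KN_nil (s : Bool) (pos n : Nat) : KN [] s pos n = n := rfl

theorem KN_cons (c : Char) (rest : List Char) (s : Bool) (pos n : Nat) :
    KN (c :: rest) s pos n =
      if c = '/' ∧ rest.head? = some '/' ∧ s = false then pos
      else KN rest (if c = '"' then !s else s) (pos + 1) n := by
  by_cases h : c = '/' ∧ rest.head? = some '/' ∧ s = false
  · rw [if_pos h]
    unfold KN
    rw [K, if_pos h]
    rfl
  · rw [if_neg h]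
    unfold KN
    rw [K, if_neg h]
    cases K rest (if c = '"' then !s else s) with
    | none => rfl
    | some j =>
      show pos + (j + 1) = pos + 1 + j
      omega

theorem scanA_eq_K (cs : List Char) : ∀ (s : Bool) (p : Option Char) (pos n : Nat),
    scanA cs s p pos n =
      if p = some '/' ∧ cs.head? = some '/' ∧ s = false then pos - 1 else KN cs s pos n := by
  induction cs with
  | nil => intro s p pos n; simp [scanA, KN_nil]
  | cons c rest ih =>
    intro s p pos n
    by_cases hc : c = '/' <;> by_cases hp : p = some '/' <;> by_cases hsf : s = false <;>
      by_cases hh : rest.head? = some '/' <;>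
        simp [scanA, ih, KN_cons, hc, hp, hsf, hh]

theorem qsplit_ne_nil (cs : List Char) : qsplit cs ≠ [] := by
  cases cs with
  | nil => simp [qsplit]
  | cons c rest =>
    simp only [qsplit]
    split_ifs
    · simp
    · cases h : qsplit rest with
      | nil => exact absurd h (qsplit_ne_nil rest)
      | cons x xs => simp [List.modifyHead]

theorem qsplit_noquote (cs : List Char) (h : ∀ c ∈ cs, c ≠ '"') : qsplit cs = [cs] := by
  induction cs with
  | nil => rfl
  | cons c rest ih =>
    have hc : c ≠ '"' := h c (by simp)
    simp [qsplit, hc, ih (fun x hx => h x (by simp [hx])), List.modifyHead]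

theorem qsplit_append (seg rest : List Char) (h : ∀ c ∈ seg, c ≠ '"') :
    qsplit (seg ++ '"' :: rest) = seg :: qsplit rest := by
  induction seg with
  | nil => simp [qsplit]
  | cons c seg' ih =>
    have hc : c ≠ '"' := h c (by simp)
    have := ih (fun x hx => h x (by simp [hx]))
    simp [qsplit, hc, this, List.modifyHead]

theorem splitOn_go_eq' : ∀ (fuel : Nat) (l cur : List Char) (acc : List (List Char)),
    l.length ≤ fuel →
    PySem.Chars.splitOn.go ['"'] fuel l cur acc =
      acc.reverse ++ (qsplit l).modifyHead (cur.reverse ++ ·) := by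
  intro fuel
  induction fuel with
  | zero =>
    intro l cur acc h
    have : l = [] := List.length_eq_zero_iff.mp (Nat.le_zero.mp h)
    subst this
    simp [PySem.Chars.splitOn.go, qsplit, List.modifyHead]
  | succ fuel ih =>
    intro l cur acc h
    cases l with
    | nil => simp [PySem.Chars.splitOn.go, qsplit, List.modifyHead]
    | cons c rest =>
      by_cases hc : c = '"'
      · subst hc
        have hpre : List.isPrefixOf ['"'] ('"' :: rest) = true := by
          simp [List.isPrefixOf]
        rw [PySem.Chars.splitOn.go]
        simp only [hpre, if_true]
        have hdrop : List.drop (['"'] : List Char).length ('"' :: rest) = rest := by simp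
        rw [hdrop, ih rest [] (cur.reverse :: acc) (by simpa using Nat.le_of_succ_le_succ h)]
        cases hq : qsplit rest with
        | nil => exact absurd hq (qsplit_ne_nil rest)
        | cons x xs => simp [qsplit, hq, List.modifyHead]
      · have hpre : List.isPrefixOf ['"'] (c :: rest) = false := by
          simp [List.isPrefixOf]; exact fun hcc => absurd hcc.symm hc
        rw [PySem.Chars.splitOn.go]
        simp only [hpre, Bool.false_eq_true, if_false]
        rw [ih rest (c :: cur) acc (by simpa using Nat.le_of_succ_le_succ h)]
        cases hq : qsplit rest with
        | nil => exact absurd hq (qsplit_ne_nil rest)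
        | cons x xs => simp [qsplit, hc, hq, List.modifyHead]

theorem splitOn_eq_qsplit (cs : List Char) : PySem.Chars.splitOn cs ['"'] = qsplit cs := by
  unfold PySem.Chars.splitOn
  rw [splitOn_go_eq' (cs.length + 1) cs [] [] (by omega)]
  cases hq : qsplit cs with
  | nil => exact absurd hq (qsplit_ne_nil cs)
  | cons x xs => simp [List.modifyHead]

theorem findgo_eq_find2 (l : List Char) : ∀ k : Nat,
    PySem.Chars.find.go ['/', '/'] l k =
      match find2 l with | some j => ((k + j : Nat) : Int) | none => -1 := by
  induction l with
  | nil => intro k; simp [PySem.Chars.find.go, find2]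
  | cons c rest ih =>
    intro k
    cases rest with
    | nil =>
      by_cases hc : c = '/' <;>
        simp [PySem.Chars.find.go, find2, List.isPrefixOf, hc]
    | cons d t =>
      rw [PySem.Chars.find.go]
      by_cases hcd : c = '/' ∧ d = '/'
      · have hpre : List.isPrefixOf ['/', '/'] (c :: d :: t) = true := by
          simp [List.isPrefixOf, hcd.1, hcd.2]
        rw [hpre]
        simp [find2, hcd.1, hcd.2]
      · have hpre : List.isPrefixOf ['/', '/'] (c :: d :: t) = false := by
          simp only [List.isPrefixOf, Bool.and_eq_false_iff]
          rcases not_and_or.mp hcd with hx | hx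
          · left; simp; exact fun hy => hx hy.symm
          · right; left; simp; exact fun hy => hx hy.symm
        rw [hpre]
        simp only [Bool.false_eq_true, if_false]
        rw [ih (k + 1)]
        have hfind2 : find2 (c :: d :: t) = (find2 (d :: t)).map (· + 1) := by
          rw [find2, if_neg]
          intro hx
          exact hcd ⟨hx.1, by simpa using hx.2⟩
        rw [hfind2]
        cases find2 (d :: t) <;> simp <;> push_cast <;> ring

theorem find_eq_find2 (l : List Char) : PySem.Chars.find l ['/', '/'] =
    match find2 l with | some j => (j : Int) | none => -1 := by
  unfold PySem.Chars.find
  rw [findgo_eq_find2 l 0]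
  cases hf : find2 l <;> simp

theorem K_seg_false : ∀ (seg rest : List Char), (∀ c ∈ seg, c ≠ '"') → rest.head? ≠ some '/' →
    K (seg ++ rest) false =
      match find2 seg with
      | some j => some j
      | none => (K rest false).map (· + seg.length)
  | [], rest, _, _ => by
      simp only [List.nil_append, find2, List.length_nil]
      cases K rest false <;> simp
  | c :: seg', rest, h, hr => by
      have hc : c ≠ '"' := h c (by simp)
      have h' : ∀ x ∈ seg', x ≠ '"' := fun x hx => h x (by simp [hx])
      have htog : (if c = '"' then !false else false) = false := by simp [hc]
      have hhead : (seg' ++ rest).head? = some '/' ↔ seg'.head? = some '/' := by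
        cases seg' with
        | nil =>
          simp only [List.nil_append, List.head?_nil]
          exact ⟨fun hx => absurd hx hr, fun hx => by simp at hx⟩
        | cons d t => simp
      rw [List.cons_append, K, find2, htog]
      by_cases hfire : c = '/' ∧ seg'.head? = some '/'
      · rw [if_pos ⟨hfire.1, hhead.mpr hfire.2, rfl⟩, if_pos hfire]
      · rw [if_neg (fun hx => hfire ⟨hx.1, hhead.mp hx.2.1⟩), if_neg hfire]
        rw [K_seg_false seg' rest h' hr]
        cases find2 seg' with
        | some j => simp
        | none => cases K rest false <;> simp <;> omega

theorem K_seg_true : ∀ (seg rest : List Char), (∀ c ∈ seg, c ≠ '"') →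
    K (seg ++ rest) true = (K rest true).map (· + seg.length)
  | [], rest, _ => by
      simp only [List.nil_append, List.length_nil]
      cases K rest true <;> simp
  | c :: seg', rest, h => by
      have hc : c ≠ '"' := h c (by simp)
      have htog : (if c = '"' then !true else true) = true := by simp [hc]
      rw [List.cons_append, K, htog]
      rw [if_neg (by simp)]
      rw [K_seg_true seg' rest (fun x hx => h x (by simp [hx]))]
      cases K rest true <;> simp <;> omega

theorem quote_decomp (cs : List Char) :
    (∀ c ∈ cs, c ≠ '"') ∨ ∃ seg rest, cs = seg ++ '"' :: rest ∧ ∀ c ∈ seg, c ≠ '"' := by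
  induction cs with
  | nil => exact Or.inl (by simp)
  | cons c cs' ih =>
    by_cases hc : c = '"'
    · exact Or.inr ⟨[], cs', by simp [hc], by simp⟩
    · rcases ih with h | ⟨seg, rest, hcs, hseg⟩
      · refine Or.inl ?_
        intro x hx
        rcases List.mem_cons.mp hx with h1 | h1
        · exact h1 ▸ hc
        · exact h x h1
      · refine Or.inr ⟨c :: seg, rest, by simp [hcs], ?_⟩
        intro x hx
        rcases List.mem_cons.mp hx with h1 | h1
        · exact h1 ▸ hc
        · exact hseg x h1

theorem findCutB_noquote (cs : List Char) (h : ∀ c ∈ cs, c ≠ '"') (i : Nat) (off : Int) :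
    findCutB (qsplit cs) i off = (K cs (decide (i % 2 = 1))).map (fun j => off + (j : Int)) := by
  rw [qsplit_noquote cs h]
  by_cases hi : i % 2 = 0
  · have hi1 : ¬(i % 2 = 1) := by omega
    simp only [findCutB, if_pos hi, find_eq_find2]
    cases hf : find2 cs with
    | none =>
      have : K cs false = none := by
        have := K_seg_false cs [] h (by simp)
        simpa [hf] using this
      simp [hi1, this]
    | some j =>
      have hj : ¬((j : Int) = -1) := by omega
      have : K cs false = some j := by
        have := K_seg_false cs [] h (by simp)
        simpa [hf] using this
      simp [hj, hi1, this]
  · have hi1 : i % 2 = 1 := by omega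
    simp only [findCutB, if_neg hi]
    have : K cs true = none := by
      have := K_seg_true cs [] h
      simpa using this
    simp [hi1, this]

theorem findCutB_eq_K : ∀ (fuel : Nat) (cs : List Char) (i : Nat) (off : Int), cs.length ≤ fuel →
    findCutB (qsplit cs) i off = (K cs (decide (i % 2 = 1))).map (fun j => off + (j : Int)) := by
  intro fuel
  induction fuel with
  | zero =>
    intro cs i off h
    have : cs = [] := List.length_eq_zero_iff.mp (Nat.le_zero.mp h)
    subst this
    exact findCutB_noquote [] (by simp) i off
  | succ fuel ih =>
    intro cs i off h
    rcases quote_decomp cs with hnq | ⟨seg, rest, hcs, hseg⟩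
    · exact findCutB_noquote cs hnq i off
    · subst hcs
      have hlen : rest.length ≤ fuel := by simp at h; omega
      rw [qsplit_append seg rest hseg]
      by_cases hi : i % 2 = 0
      · have hi1 : ¬(i % 2 = 1) := by omega
        simp only [findCutB, if_pos hi, find_eq_find2]
        cases hf : find2 seg with
        | some j =>
          have hj : ¬((j : Int) = -1) := by omega
          have : K (seg ++ '"' :: rest) false = some j := by
            have := K_seg_false seg ('"' :: rest) hseg (by simp)
            simpa [hf] using this
          simp [hj, hi1, this]
        | none =>
          simp only [reduceIte]
          rw [ih rest (i + 1) (off + seg.length + 1) hlen]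
          have hi2 : ((i + 1) % 2 = 1) := by omega
          have hd1 : decide (i % 2 = 1) = false := by simp [hi1]
          have hd2 : decide ((i + 1) % 2 = 1) = true := by simp [hi2]
          rw [hd1, hd2]
          have hK1 : K ('"' :: rest) false = (K rest true).map (· + 1) := by
            simp [K]
          have : K (seg ++ '"' :: rest) false = (K rest true).map (fun j => j + 1 + seg.length) := by
            have := K_seg_false seg ('"' :: rest) hseg (by simp)
            rw [this, hf, hK1]
            cases K rest true <;> simp
          rw [this]
          cases K rest true <;> simp <;> push_cast <;> ring
      · have hi1 : i % 2 = 1 := by omega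
        simp only [findCutB, if_neg hi]
        rw [ih rest (i + 1) (off + seg.length + 1) hlen]
        have hi2 : ¬((i + 1) % 2 = 1) := by omega
        have hd1 : decide (i % 2 = 1) = true := by simp [hi1]
        have hd2 : decide ((i + 1) % 2 = 1) = false := by simp [hi2]
        rw [hd1, hd2]
        have hK1 : K ('"' :: rest) true = (K rest false).map (· + 1) := by
          simp [K]
        have : K (seg ++ '"' :: rest) true = (K rest false).map (fun j => j + 1 + seg.length) := by
          rw [K_seg_true seg ('"' :: rest) hseg, hK1]
          cases K rest false <;> simp
        rw [this]
        cases K rest false <;> simp <;> push_cast <;> ring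

theorem cleanLine_eq (line : String) : cleanLineA line = cleanLineB line := by
  have hA : cleanLineA line = String.ofList (PySem.List.slice line.toList none
      (some ((scanA line.toList false none 0 line.toList.length : Nat) : Int))) := rfl
  have hB : cleanLineB line =
      (match findCutB (PySem.Chars.splitOn line.toList ['"']) 0 0 with
       | none => line
       | some cut => String.ofList (PySem.List.slice line.toList none (some cut))) := rfl
  rw [hA, hB, splitOn_eq_qsplit, findCutB_eq_K line.toList.length line.toList 0 0 le_rfl]
  rw [scanA_eq_K]
  rw [if_neg (by simp)]
  have h0 : (decide (0 % 2 = 1)) = false := by decide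
  rw [h0]
  cases hk : K line.toList false with
  | none =>
    have h1 : KN line.toList false 0 line.toList.length = line.toList.length := by
      unfold KN; rw [hk]
    rw [h1, PySem.List.slice_to_natCast, List.take_length, String.ofList_toList]
    rfl
  | some j =>
    have h1 : KN line.toList false 0 line.toList.length = j := by
      unfold KN; rw [hk]; simp
    rw [h1]
    simp

-- ===== VERDICT (by name: the statement is the Claim_ definition above) =====
theorem clean_comments_spec : Claim_equal_clean_comments := by
  intro lines _
  unfold Spec_clean_comments clean_comments clean_comments_alt
  simp [List.map_congr_left (fun l _ => cleanLine_eq l)]
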